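-- pv_equiv track=rewrite | github.com/supportersimulator/contextdna-ide | tools/trialbench_blinder.py | _redact_arm_tokens
-- ===== SOURCE A (Python) =====
-- _ARM_LABEL_TOKENS = (
--     "C_contextdna_packet",
--     "C_governed",
--     "A_raw",
--     "B_synthetic",
-- )
--
-- def _redact_arm_tokens(text: str) -> tuple[str, int]:
--     """Replace any arm-label tokens in free-text content with [REDACTED_ARM].
--
--     Returns (redacted_text, redaction_count). Used as defense-in-depth: even
--     if a model echoes back its arm label inside outcome_content, we strip it.
--     """
--     if not isinstance(text, str) or not text:
--         return text, 0
--     redactions = 0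
--     out = text
--     for token in _ARM_LABEL_TOKENS:
--         # word-boundary-ish: token may appear in JSON, prose, or as a key.
--         # Use plain substring replace because arm tokens contain underscores
--         # which \b doesn't treat as a boundary.
--         if token in out:
--             occurrences = out.count(token)
--             out = out.replace(token, "[REDACTED_ARM]")
--             redactions += occurrences
--     return out, redactions
-- ===== SOURCE B (Python) =====
-- _ARM_LABEL_TOKENS = (
--     "C_contextdna_packet",
--     "C_governed",
--     "A_raw",
--     "B_synthetic",
-- )
--
-- def _redact_arm_tokens(text: str) -> tuple[str, int]:
--     """Single left-to-right scan: at each position try the arm tokens in order;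
--     on a match emit [REDACTED_ARM] and skip the token, else copy the character."""
--     if not isinstance(text, str) or not text:
--         return text, 0
--     out = []
--     redactions = 0
--     i = 0
--     n = len(text)
--     while i < n:
--         for token in _ARM_LABEL_TOKENS:
--             if text.startswith(token, i):
--                 out.append("[REDACTED_ARM]")
--                 redactions += 1
--                 i += len(token)
--                 break
--         else:
--             out.append(text[i])
--             i += 1
--     return "".join(out), redactions
-- ===== Notes on version B (the rewrite author's own statement) =====
-- stated objective: alternative
-- what changed: Replaces four sequential count-then-replace passes (one per arm token) with a single left-to-right scan that tries the tokens at each position, emitting the redaction marker and counting matches in one pass.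
import Mathlib
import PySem

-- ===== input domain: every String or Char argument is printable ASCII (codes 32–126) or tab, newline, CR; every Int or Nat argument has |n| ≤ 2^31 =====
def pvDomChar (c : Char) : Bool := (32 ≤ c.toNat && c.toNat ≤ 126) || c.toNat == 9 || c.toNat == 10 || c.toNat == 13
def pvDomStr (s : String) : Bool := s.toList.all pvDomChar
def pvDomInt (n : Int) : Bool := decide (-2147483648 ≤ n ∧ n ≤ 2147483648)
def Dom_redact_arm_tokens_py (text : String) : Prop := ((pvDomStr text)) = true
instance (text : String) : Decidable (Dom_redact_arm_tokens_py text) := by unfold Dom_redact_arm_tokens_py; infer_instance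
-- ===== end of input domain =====

-- B replaces A's four sequential count-then-replace passes by one left-to-right scan
-- that tries the tokens at each position (alternative single-pass algorithm, same result).

-- ===== PORT A =====
-- the module constant _ARM_LABEL_TOKENS
def pvTokens : List String := ["C_contextdna_packet", "C_governed", "A_raw", "B_synthetic"]

def redact_arm_tokens_py (text : String) : String × Int :=
  if text = "" then (text, 0)
  else
    -- for token in _ARM_LABEL_TOKENS: if token in out: occ = out.count(token); out = out.replace(token, "[REDACTED_ARM]"); redactions += occ
    pvTokens.foldl
      (fun (st : String × Int) (token : String) =>
        if PySem.Str.isIn token st.1 then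
          let occurrences := PySem.Str.count st.1 token
          (PySem.Str.replace st.1 token "[REDACTED_ARM]", st.2 + (occurrences : Int))
        else st)
      (text, 0)

-- ===== PORT B =====
-- B's char-list scan: at each position try the four tokens in order; on a match emit
-- the marker and skip the token, else copy the character (the while/for-else loop of Source B).
def pvScanB : List Char → List Char × Nat
  | [] => ([], 0)
  | c :: t =>
    if "C_contextdna_packet".toList.isPrefixOf (c :: t) then
      let p := pvScanB (t.drop ("C_contextdna_packet".toList.length - 1))
      ("[REDACTED_ARM]".toList ++ p.1, p.2 + 1)
    else if "C_governed".toList.isPrefixOf (c :: t) then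
      let p := pvScanB (t.drop ("C_governed".toList.length - 1))
      ("[REDACTED_ARM]".toList ++ p.1, p.2 + 1)
    else if "A_raw".toList.isPrefixOf (c :: t) then
      let p := pvScanB (t.drop ("A_raw".toList.length - 1))
      ("[REDACTED_ARM]".toList ++ p.1, p.2 + 1)
    else if "B_synthetic".toList.isPrefixOf (c :: t) then
      let p := pvScanB (t.drop ("B_synthetic".toList.length - 1))
      ("[REDACTED_ARM]".toList ++ p.1, p.2 + 1)
    else
      let p := pvScanB t
      (c :: p.1, p.2)
termination_by l => l.length
decreasing_by all_goals (simp; try omega)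

def redact_arm_tokens_py_alt (text : String) : String × Int :=
  if text = "" then (text, 0)
  else
    let p := pvScanB text.toList
    (String.ofList p.1, (p.2 : Int))

-- ===== PRECONDITION & SPEC =====
def Spec_redact_arm_tokens_py (text : String) (out : String × Int) : Prop := out = redact_arm_tokens_py_alt text
instance (text : String) (out : String × Int) : Decidable (Spec_redact_arm_tokens_py text out) := by unfold Spec_redact_arm_tokens_py; infer_instance

-- ===== CLAIM (what is proved, stated in full; the proofs are below) =====
def Claim_equal_redact_arm_tokens_py : Prop := ∀ (text : String), Dom_redact_arm_tokens_py text → Spec_redact_arm_tokens_py text (redact_arm_tokens_py text)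

-- ===== LEMMAS AND PROOFS =====

-- abbreviations for the concrete token char lists (proof-side only)
def pvT1 : List Char := "C_contextdna_packet".toList
def pvT2 : List Char := "C_governed".toList
def pvT3 : List Char := "A_raw".toList
def pvT4 : List Char := "B_synthetic".toList
def pvRL : List Char := "[REDACTED_ARM]".toList

-- single-token scan: the structural form of str.count / str.replace for one token
def pvScan1 (tok : List Char) : List Char → List Char × Nat
  | [] => ([], 0)
  | c :: t =>
    if tok.isPrefixOf (c :: t) then
      let p := pvScan1 tok (t.drop (tok.length - 1))
      (pvRL ++ p.1, p.2 + 1)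
    else
      let p := pvScan1 tok t
      (c :: p.1, p.2)
termination_by l => l.length
decreasing_by all_goals (simp; try omega)

theorem replace_go_eq_scan1 (tok : List Char) (htok : tok ≠ []) :
    ∀ (fuel : Nat) (s acc : List Char), s.length ≤ fuel →
      PySem.Chars.replace.go tok pvRL fuel s acc = acc.reverse ++ (pvScan1 tok s).1 := by
  intro fuel
  induction fuel with
  | zero =>
    intro s acc h
    have hs : s = [] := by cases s <;> simp_all
    subst hs
    simp [PySem.Chars.replace.go, pvScan1]
  | succ n ih =>
    intro s acc h
    cases s with
    | nil => simp [PySem.Chars.replace.go, pvScan1]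
    | cons c t =>
      rw [PySem.Chars.replace.go, pvScan1]
      by_cases hp : tok.isPrefixOf (c :: t) = true
      · simp only [hp, if_true]
        obtain ⟨d, tk, rfl⟩ : ∃ d tk, tok = d :: tk := by
          cases tok with | nil => exact absurd rfl htok | cons a b => exact ⟨a, b, rfl⟩
        have hlen : ((c :: t).drop (d :: tk).length).length ≤ n := by
          simp at h ⊢; omega
        rw [ih _ _ hlen]
        simp
      · simp only [hp]
        have hlen : t.length ≤ n := by simp at h; omega
        rw [ih _ _ hlen]
        simp

theorem count_go_eq_scan1 (tok : List Char) (htok : tok ≠ []) :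
    ∀ (fuel : Nat) (s : List Char) (acc : Nat), s.length ≤ fuel →
      PySem.Chars.count.go tok fuel s acc = acc + (pvScan1 tok s).2 := by
  intro fuel
  induction fuel with
  | zero =>
    intro s acc h
    have hs : s = [] := by cases s <;> simp_all
    subst hs
    simp [PySem.Chars.count.go, pvScan1]
  | succ n ih =>
    intro s acc h
    cases s with
    | nil => simp [PySem.Chars.count.go, pvScan1]
    | cons c t =>
      rw [PySem.Chars.count.go, pvScan1]
      by_cases hp : tok.isPrefixOf (c :: t) = true
      · simp only [hp, if_true]
        obtain ⟨d, tk, rfl⟩ : ∃ d tk, tok = d :: tk := by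
          cases tok with | nil => exact absurd rfl htok | cons a b => exact ⟨a, b, rfl⟩
        have hlen : ((c :: t).drop (d :: tk).length).length ≤ n := by
          simp at h ⊢; omega
        rw [ih _ _ hlen]
        simp; omega
      · simp only [hp]
        have hlen : t.length ≤ n := by simp at h; omega
        rw [ih _ _ hlen]
        simp

theorem replace_eq_scan1 (tok : List Char) (htok : tok ≠ []) (s : List Char) :
    PySem.Chars.replace s tok pvRL = (pvScan1 tok s).1 := by
  rw [PySem.Chars.replace]
  have : tok.isEmpty = false := by cases tok <;> simp_all
  rw [this]
  simpa using replace_go_eq_scan1 tok htok s.length s [] (le_refl _)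

theorem count_eq_scan1 (tok : List Char) (htok : tok ≠ []) (s : List Char) :
    PySem.Chars.count s tok = (pvScan1 tok s).2 := by
  rw [PySem.Chars.count]
  have : tok.isEmpty = false := by cases tok <;> simp_all
  rw [this]
  simpa using count_go_eq_scan1 tok htok s.length s 0 (le_refl _)

theorem scan1_of_not_infix (tok : List Char) : ∀ (s : List Char), ¬ tok <:+: s →
    pvScan1 tok s = (s, 0) := by
  intro s
  induction s with
  | nil => intro _; simp [pvScan1]
  | cons c t ih =>
    intro h
    rw [pvScan1]
    have hp : tok.isPrefixOf (c :: t) = false := by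
      rw [Bool.eq_false_iff]
      intro hc
      exact h ((List.isPrefixOf_iff_prefix.mp hc).isInfix)
    rw [hp]
    simp
    have : ¬ tok <:+: t := fun hi => h (hi.trans (List.suffix_cons c t).isInfix)
    rw [ih this]
    simp

def pvClean (b tok : List Char) : Prop :=
  ∀ n, n < b.length → tok.isPrefixOf (b.drop n) = false ∧ (b.drop n).isPrefixOf tok = false

theorem scan1_clean_append (tok : List Char) : ∀ (b : List Char), pvClean b tok → ∀ (x : List Char),
    pvScan1 tok (b ++ x) = (b ++ (pvScan1 tok x).1, (pvScan1 tok x).2) := by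
  intro b
  induction b with
  | nil => intro _ x; simp
  | cons c bt ih =>
    intro hc x
    rw [List.cons_append, pvScan1]
    have hp : tok.isPrefixOf (c :: (bt ++ x)) = false := by
      rw [Bool.eq_false_iff]
      intro hpre
      have h0 := hc 0 (by simp)
      simp only [List.drop_zero] at h0
      have hpre' : tok <+: (c :: bt) ++ x := List.isPrefixOf_iff_prefix.mp hpre
      by_cases hl : tok.length ≤ (c :: bt).length
      · have : tok <+: c :: bt :=
          List.prefix_of_prefix_length_le hpre' (List.prefix_append _ _) hl
        exact absurd (List.isPrefixOf_iff_prefix.mpr this) (by simp [h0.1])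
      · have : (c :: bt) <+: tok :=
          List.prefix_of_prefix_length_le (List.prefix_append _ _) hpre' (by omega)
        exact absurd (List.isPrefixOf_iff_prefix.mpr this) (by simp [h0.2])
    rw [hp]
    have hct : pvClean bt tok := by
      intro n hn
      have := hc (n+1) (by simp; omega)
      simpa using this
    simp [ih hct x]

theorem scan1_self (tok : List Char) (htok : tok ≠ []) (x : List Char) :
    pvScan1 tok (tok ++ x) = (pvRL ++ (pvScan1 tok x).1, (pvScan1 tok x).2 + 1) := by
  obtain ⟨d, tk, rfl⟩ : ∃ d tk, tok = d :: tk := by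
    cases tok with | nil => exact absurd rfl htok | cons a b => exact ⟨a, b, rfl⟩
  rw [List.cons_append, pvScan1]
  have hp : (d :: tk).isPrefixOf (d :: (tk ++ x)) = true := by
    exact List.isPrefixOf_iff_prefix.mpr ⟨x, by simp⟩
  rw [hp]
  simp

theorem scan1_prefix_reflect (tok : List Char) :
    ∀ (s v : List Char), '[' ∉ v → v <+: (pvScan1 tok s).1 → v <+: s := by
  intro s
  induction s using pvScan1.induct tok with
  | case1 => intro v _ h; simpa [pvScan1] using h
  | case2 c t hp ih =>
    intro v hv h
    rw [pvScan1] at h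
    simp only [hp, if_true] at h
    rcases v with _ | ⟨vh, vt⟩
    · exact List.nil_prefix
    · exfalso
      obtain ⟨t1, he⟩ := h
      have hh : vh = '[' := by
        have := congrArg List.head? he
        simpa [pvRL] using this
      exact hv (by simp [hh])
  | case3 c t hp ih =>
    intro v hv h
    rw [pvScan1] at h
    simp only [hp] at h
    simp only [Bool.false_eq_true, if_false] at h
    rcases v with _ | ⟨vh, vt⟩
    · exact List.nil_prefix
    · simp only [List.cons_prefix_cons] at h ⊢
      refine ⟨h.1, ih vt (fun hm => hv (List.mem_cons_of_mem _ hm)) h.2⟩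

-- concrete cleanliness facts
theorem clean_rl_t2 : pvClean pvRL pvT2 := by unfold pvClean pvRL pvT2; decide
theorem clean_rl_t3 : pvClean pvRL pvT3 := by unfold pvClean pvRL pvT3; decide
theorem clean_rl_t4 : pvClean pvRL pvT4 := by unfold pvClean pvRL pvT4; decide
theorem clean_t2_t1 : pvClean pvT2 pvT1 := by unfold pvClean pvT2 pvT1; decide
theorem clean_t3_t1 : pvClean pvT3 pvT1 := by unfold pvClean pvT3 pvT1; decide
theorem clean_t3_t2 : pvClean pvT3 pvT2 := by unfold pvClean pvT3 pvT2; decide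
theorem clean_t4_t1 : pvClean pvT4 pvT1 := by unfold pvClean pvT4 pvT1; decide
theorem clean_t4_t2 : pvClean pvT4 pvT2 := by unfold pvClean pvT4 pvT2; decide
theorem clean_t4_t3 : pvClean pvT4 pvT3 := by unfold pvClean pvT4 pvT3; decide

-- chain step lemmas
def pvChain (s : List Char) : List Char × Nat :=
  ((pvScan1 pvT4 (pvScan1 pvT3 (pvScan1 pvT2 (pvScan1 pvT1 s).1).1).1).1,
   (pvScan1 pvT1 s).2
     + (pvScan1 pvT2 (pvScan1 pvT1 s).1).2
     + (pvScan1 pvT3 (pvScan1 pvT2 (pvScan1 pvT1 s).1).1).2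
     + (pvScan1 pvT4 (pvScan1 pvT3 (pvScan1 pvT2 (pvScan1 pvT1 s).1).1).1).2)

theorem chain_t1 (x : List Char) :
    pvChain (pvT1 ++ x) = (pvRL ++ (pvChain x).1, (pvChain x).2 + 1) := by
  unfold pvChain
  rw [scan1_self pvT1 (by decide) x,
      scan1_clean_append pvT2 pvRL clean_rl_t2,
      scan1_clean_append pvT3 pvRL clean_rl_t3,
      scan1_clean_append pvT4 pvRL clean_rl_t4]
  simp; omega

theorem chain_t2 (x : List Char) :
    pvChain (pvT2 ++ x) = (pvRL ++ (pvChain x).1, (pvChain x).2 + 1) := by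
  unfold pvChain
  rw [scan1_clean_append pvT1 pvT2 clean_t2_t1,
      scan1_self pvT2 (by decide),
      scan1_clean_append pvT3 pvRL clean_rl_t3,
      scan1_clean_append pvT4 pvRL clean_rl_t4]
  simp; omega

theorem chain_t3 (x : List Char) :
    pvChain (pvT3 ++ x) = (pvRL ++ (pvChain x).1, (pvChain x).2 + 1) := by
  unfold pvChain
  rw [scan1_clean_append pvT1 pvT3 clean_t3_t1,
      scan1_clean_append pvT2 pvT3 clean_t3_t2,
      scan1_self pvT3 (by decide),
      scan1_clean_append pvT4 pvRL clean_rl_t4]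
  simp; omega

theorem chain_t4 (x : List Char) :
    pvChain (pvT4 ++ x) = (pvRL ++ (pvChain x).1, (pvChain x).2 + 1) := by
  unfold pvChain
  rw [scan1_clean_append pvT1 pvT4 clean_t4_t1,
      scan1_clean_append pvT2 pvT4 clean_t4_t2,
      scan1_clean_append pvT3 pvT4 clean_t4_t3,
      scan1_self pvT4 (by decide)]
  simp; omega

theorem scan1_cons_neg (tok : List Char) (c : Char) (t : List Char)
    (h : tok.isPrefixOf (c :: t) = false) :
    pvScan1 tok (c :: t) = (c :: (pvScan1 tok t).1, (pvScan1 tok t).2) := by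
  rw [pvScan1]; simp [h]

theorem not_prefix_cons_reflect (tok : List Char) (hv : '[' ∉ tok) (c : Char) (t a : List Char)
    (hrefl : ∀ v, '[' ∉ v → v <+: a → v <+: t)
    (h : tok.isPrefixOf (c :: t) = false) : tok.isPrefixOf (c :: a) = false := by
  rw [Bool.eq_false_iff]
  intro hp
  rcases tok with _ | ⟨d, tk⟩
  · simp at h
  · have hp' := List.isPrefixOf_iff_prefix.mp hp
    rw [List.cons_prefix_cons] at hp'
    have htk : tk <+: t := hrefl tk (fun hm => hv (List.mem_cons_of_mem _ hm)) hp'.2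
    have : (d :: tk) <+: (c :: t) := List.cons_prefix_cons.mpr ⟨hp'.1, htk⟩
    rw [List.isPrefixOf_iff_prefix.mpr this] at h
    simp at h

theorem chain_cons (c : Char) (t : List Char)
    (h1 : pvT1.isPrefixOf (c :: t) = false) (h2 : pvT2.isPrefixOf (c :: t) = false)
    (h3 : pvT3.isPrefixOf (c :: t) = false) (h4 : pvT4.isPrefixOf (c :: t) = false) :
    pvChain (c :: t) = (c :: (pvChain t).1, (pvChain t).2) := by
  have h2' : pvT2.isPrefixOf (c :: (pvScan1 pvT1 t).1) = false :=
    not_prefix_cons_reflect pvT2 (by decide) c t _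
      (fun v hv hp => scan1_prefix_reflect pvT1 t v hv hp) h2
  have h3' : pvT3.isPrefixOf (c :: (pvScan1 pvT2 (pvScan1 pvT1 t).1).1) = false :=
    not_prefix_cons_reflect pvT3 (by decide) c t _
      (fun v hv hp => scan1_prefix_reflect pvT1 t v hv
        (scan1_prefix_reflect pvT2 _ v hv hp)) h3
  have h4' : pvT4.isPrefixOf (c :: (pvScan1 pvT3 (pvScan1 pvT2 (pvScan1 pvT1 t).1).1).1) = false :=
    not_prefix_cons_reflect pvT4 (by decide) c t _
      (fun v hv hp => scan1_prefix_reflect pvT1 t v hv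
        (scan1_prefix_reflect pvT2 _ v hv
          (scan1_prefix_reflect pvT3 _ v hv hp))) h4
  unfold pvChain
  rw [scan1_cons_neg pvT1 c t h1, scan1_cons_neg pvT2 _ _ h2',
      scan1_cons_neg pvT3 _ _ h3', scan1_cons_neg pvT4 _ _ h4']

theorem scanB_cons_neg (c : Char) (t : List Char)
    (h1 : pvT1.isPrefixOf (c :: t) = false) (h2 : pvT2.isPrefixOf (c :: t) = false)
    (h3 : pvT3.isPrefixOf (c :: t) = false) (h4 : pvT4.isPrefixOf (c :: t) = false) :
    pvScanB (c :: t) = (c :: (pvScanB t).1, (pvScanB t).2) := by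
  simp only [pvT1] at h1; simp only [pvT2] at h2
  simp only [pvT3] at h3; simp only [pvT4] at h4
  rw [pvScanB]
  simp only [h1, h2, h3, h4, Bool.false_eq_true, if_false]

theorem scanB_t1 (x : List Char) :
    pvScanB (pvT1 ++ x) = (pvRL ++ (pvScanB x).1, (pvScanB x).2 + 1) := by
  rw [show pvT1 ++ x = 'C' :: ("_contextdna_packet".toList ++ x) from rfl, pvScanB]
  have hp : "C_contextdna_packet".toList.isPrefixOf ('C' :: ("_contextdna_packet".toList ++ x)) = true :=
    List.isPrefixOf_iff_prefix.mpr ⟨x, rfl⟩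
  rw [hp]
  simp [pvRL]

theorem scanB_t2 (x : List Char) (h1 : pvT1.isPrefixOf (pvT2 ++ x) = false) :
    pvScanB (pvT2 ++ x) = (pvRL ++ (pvScanB x).1, (pvScanB x).2 + 1) := by
  simp only [pvT1, pvT2] at h1
  rw [show pvT2 ++ x = 'C' :: ("_governed".toList ++ x) from rfl, pvScanB]
  have hp : "C_governed".toList.isPrefixOf ('C' :: ("_governed".toList ++ x)) = true :=
    List.isPrefixOf_iff_prefix.mpr ⟨x, rfl⟩
  rw [show ("C_contextdna_packet".toList.isPrefixOf ('C' :: ("_governed".toList ++ x))) = false from h1, hp]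
  simp [pvRL]

theorem scanB_t3 (x : List Char) (h1 : pvT1.isPrefixOf (pvT3 ++ x) = false)
    (h2 : pvT2.isPrefixOf (pvT3 ++ x) = false) :
    pvScanB (pvT3 ++ x) = (pvRL ++ (pvScanB x).1, (pvScanB x).2 + 1) := by
  simp only [pvT1, pvT3] at h1
  simp only [pvT2, pvT3] at h2
  rw [show pvT3 ++ x = 'A' :: ("_raw".toList ++ x) from rfl, pvScanB]
  have hp : "A_raw".toList.isPrefixOf ('A' :: ("_raw".toList ++ x)) = true :=
    List.isPrefixOf_iff_prefix.mpr ⟨x, rfl⟩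
  rw [show ("C_contextdna_packet".toList.isPrefixOf ('A' :: ("_raw".toList ++ x))) = false from h1,
      show ("C_governed".toList.isPrefixOf ('A' :: ("_raw".toList ++ x))) = false from h2, hp]
  simp [pvRL]

theorem scanB_t4 (x : List Char) (h1 : pvT1.isPrefixOf (pvT4 ++ x) = false)
    (h2 : pvT2.isPrefixOf (pvT4 ++ x) = false) (h3 : pvT3.isPrefixOf (pvT4 ++ x) = false) :
    pvScanB (pvT4 ++ x) = (pvRL ++ (pvScanB x).1, (pvScanB x).2 + 1) := by
  simp only [pvT1, pvT4] at h1
  simp only [pvT2, pvT4] at h2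
  simp only [pvT3, pvT4] at h3
  rw [show pvT4 ++ x = 'B' :: ("_synthetic".toList ++ x) from rfl, pvScanB]
  have hp : "B_synthetic".toList.isPrefixOf ('B' :: ("_synthetic".toList ++ x)) = true :=
    List.isPrefixOf_iff_prefix.mpr ⟨x, rfl⟩
  rw [show ("C_contextdna_packet".toList.isPrefixOf ('B' :: ("_synthetic".toList ++ x))) = false from h1,
      show ("C_governed".toList.isPrefixOf ('B' :: ("_synthetic".toList ++ x))) = false from h2,
      show ("A_raw".toList.isPrefixOf ('B' :: ("_synthetic".toList ++ x))) = false from h3, hp]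
  simp [pvRL]

theorem scan1_nil (tok : List Char) : pvScan1 tok [] = ([], 0) := by rw [pvScan1]
theorem scanB_nil : pvScanB [] = ([], 0) := by rw [pvScanB]

theorem chain_eq_scanB_aux : ∀ (n : Nat) (s : List Char), s.length ≤ n → pvChain s = pvScanB s := by
  intro n
  induction n with
  | zero =>
    intro s h
    have hs : s = [] := by cases s <;> simp_all
    subst hs; simp [pvChain, scan1_nil, scanB_nil]
  | succ n ih =>
    intro s h
    by_cases h1 : pvT1.isPrefixOf s = true
    · obtain ⟨x, rfl⟩ := List.isPrefixOf_iff_prefix.mp h1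
      have hx : x.length ≤ n := by
        rw [List.length_append, show pvT1.length = 19 from rfl] at h; omega
      rw [chain_t1, scanB_t1, ih x hx]
    · have h1' : pvT1.isPrefixOf s = false := by simp only [Bool.not_eq_true] at h1; exact h1
      by_cases h2 : pvT2.isPrefixOf s = true
      · obtain ⟨x, rfl⟩ := List.isPrefixOf_iff_prefix.mp h2
        have hx : x.length ≤ n := by
          rw [List.length_append, show pvT2.length = 10 from rfl] at h; omega
        rw [chain_t2, scanB_t2 x h1', ih x hx]
      · have h2' : pvT2.isPrefixOf s = false := by simp only [Bool.not_eq_true] at h2; exact h2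
        by_cases h3 : pvT3.isPrefixOf s = true
        · obtain ⟨x, rfl⟩ := List.isPrefixOf_iff_prefix.mp h3
          have hx : x.length ≤ n := by
            rw [List.length_append, show pvT3.length = 5 from rfl] at h; omega
          rw [chain_t3, scanB_t3 x h1' h2', ih x hx]
        · have h3' : pvT3.isPrefixOf s = false := by simp only [Bool.not_eq_true] at h3; exact h3
          by_cases h4 : pvT4.isPrefixOf s = true
          · obtain ⟨x, rfl⟩ := List.isPrefixOf_iff_prefix.mp h4
            have hx : x.length ≤ n := by
              rw [List.length_append, show pvT4.length = 11 from rfl] at h; omega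
            rw [chain_t4, scanB_t4 x h1' h2' h3', ih x hx]
          · have h4' : pvT4.isPrefixOf s = false := by simp only [Bool.not_eq_true] at h4; exact h4
            cases s with
            | nil => simp [pvChain, scan1_nil, scanB_nil]
            | cons c t =>
              have ht : t.length ≤ n := by simp at h; omega
              rw [chain_cons c t h1' h2' h3' h4', scanB_cons_neg c t h1' h2' h3' h4', ih t ht]

theorem chain_eq_scanB (s : List Char) : pvChain s = pvScanB s :=
  chain_eq_scanB_aux s.length s le_rfl

-- one pass of A's token loop, expressed through the single-token scan
theorem step_eq (tokS : String) (htok : tokS.toList ≠ [])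
    (hrl : "[REDACTED_ARM]".toList = pvRL) (s : String) (k : Int) :
    (if PySem.Str.isIn tokS s = true then
       (PySem.Str.replace s tokS "[REDACTED_ARM]", k + ((PySem.Str.count s tokS : Nat) : Int))
     else (s, k))
    = (String.ofList (pvScan1 tokS.toList s.toList).1,
       k + ((pvScan1 tokS.toList s.toList).2 : Int)) := by
  by_cases hin : PySem.Str.isIn tokS s = true
  · rw [if_pos hin]
    rw [PySem.Str.replace, PySem.Str.count, hrl,
        replace_eq_scan1 tokS.toList htok, count_eq_scan1 tokS.toList htok]
  · rw [if_neg hin]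
    have hninf : ¬ tokS.toList <:+: s.toList := by
      have : PySem.Chars.isIn tokS.toList s.toList = false := by
        rw [PySem.Str.isIn] at hin; simpa using hin
      exact (PySem.Chars.isIn_eq_false_iff _ _).mp this
    rw [scan1_of_not_infix tokS.toList s.toList hninf]
    simp [String.ofList_toList]

theorem redact_arm_tokens_py_spec : Claim_equal_redact_arm_tokens_py := by
  intro text _
  unfold Spec_redact_arm_tokens_py redact_arm_tokens_py redact_arm_tokens_py_alt
  by_cases ht : text = ""
  · rw [if_pos ht, if_pos ht]
  · rw [if_neg ht, if_neg ht]
    rw [pvTokens]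
    simp only [List.foldl_cons, List.foldl_nil]
    rw [step_eq "C_contextdna_packet" (by decide) rfl]
    simp only []
    rw [step_eq "C_governed" (by decide) rfl]
    simp only []
    rw [step_eq "A_raw" (by decide) rfl]
    simp only []
    rw [step_eq "B_synthetic" (by decide) rfl]
    simp only [String.toList_ofList]
    have hch := chain_eq_scanB text.toList
    unfold pvChain at hch
    have hfst := congrArg Prod.fst hch
    have hsnd := congrArg Prod.snd hch
    simp only [pvT1, pvT2, pvT3, pvT4, String.reduceToList] at hfst hsnd
    rw [Prod.mk.injEq]
    constructor
    · exact congrArg String.ofList hfst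
    · push_cast
      omega
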